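-- pv_equiv track=rewrite | github.com/gogotape/yandex_algorithms_6.0 | homework2/taskH/taskH.py | dummy
-- ===== SOURCE A (Python) =====
-- def dummy(cabinets: list[int]) -> int:
--     res = float("inf")
--     for i in range(len(cabinets)):
--         cur_res = 0
--         for j in range(len(cabinets)):
--             cur_res += cabinets[j] * abs(j - i)
--         res = min(res, cur_res)
--     return res
-- ===== SOURCE B (Python) =====
-- def dummy(cabinets: list[int]) -> int:
--     n = len(cabinets)
--     total = sum(cabinets)
--     cur = sum(j * c for j, c in enumerate(cabinets))
--     best = cur
--     left = 0
--     for i in range(n - 1):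
--         left += cabinets[i]
--         cur += 2 * left - total
--         if cur < best:
--             best = cur
--     return best
-- ===== Notes on version B (the rewrite author's own statement) =====
-- stated objective: faster
-- what changed: Replaced the quadratic all-pairs recomputation of each candidate cost by a single pass that maintains a running left prefix weight and updates the weighted-distance cost incrementally (cost(i+1) = cost(i) + 2*left - total).
-- outside the precondition, e.g. on dummy([]): A returns inf, B returns 0
import Mathlib
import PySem

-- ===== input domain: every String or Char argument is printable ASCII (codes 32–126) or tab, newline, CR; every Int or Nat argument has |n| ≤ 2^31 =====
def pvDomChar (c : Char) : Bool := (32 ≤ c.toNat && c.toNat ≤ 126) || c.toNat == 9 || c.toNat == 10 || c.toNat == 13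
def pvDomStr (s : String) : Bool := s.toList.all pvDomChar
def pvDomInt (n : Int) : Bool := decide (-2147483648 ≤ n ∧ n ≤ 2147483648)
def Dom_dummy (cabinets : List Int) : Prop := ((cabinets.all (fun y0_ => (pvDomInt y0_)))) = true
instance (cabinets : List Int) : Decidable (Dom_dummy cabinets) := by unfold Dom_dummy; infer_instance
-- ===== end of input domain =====

-- B replaces A's O(n^2) all-pairs cost recomputation by an O(n) prefix-sum incremental update of the cost.


-- ===== PORT A =====
-- inner loop: cur_res = Σ_j cabinets[j] * abs(j - i)
def dummyInner (cabinets : List Int) (i : Int) : Int :=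
  (PySem.List.pyRange 0 cabinets.length 1).foldl
    (fun cur j => cur + PySem.List.pyGetD cabinets j 0 * |j - i|) 0

-- res starts as float("inf"): modelled as Option Int (none = inf); min(inf, x) = x.
-- On the empty list A returns float("inf"), not an int — excluded by Pre_dummy; .getD 0 is arbitrary there.
def dummy (cabinets : List Int) : Int :=
  ((PySem.List.pyRange 0 cabinets.length 1).foldl
    (fun (res : Option Int) i =>
      some (match res with
            | none => dummyInner cabinets i
            | some r => min r (dummyInner cabinets i))) none).getD 0

-- ===== PORT B =====
def dummy_alt (cabinets : List Int) : Int :=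
  let n : Int := cabinets.length
  let total := cabinets.sum
  let cur0 := (PySem.List.enumerate cabinets 0).foldl (fun a p => a + p.1 * p.2) 0
  let st := (PySem.List.pyRange 0 (n - 1) 1).foldl
    (fun (st : Int × Int × Int) i =>
      let left := st.1 + PySem.List.pyGetD cabinets i 0
      let cur := st.2.1 + 2 * left - total
      (left, cur, if cur < st.2.2 then cur else st.2.2))
    (0, cur0, cur0)
  st.2.2

-- ===== PRECONDITION & SPEC =====
-- Pre_ excludes only the empty list, on which A returns float("inf") — a float, not a value of the declared int type.
def Pre_dummy (cabinets : List Int) : Prop := cabinets ≠ []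
instance (cabinets : List Int) : Decidable (Pre_dummy cabinets) := by unfold Pre_dummy; infer_instance
def pvWitness_dummy : List Int := ([1, 2])

def Spec_dummy (cabinets : List Int) (out : Int) : Prop := out = dummy_alt cabinets
instance (cabinets : List Int) (out : Int) : Decidable (Spec_dummy cabinets out) := by unfold Spec_dummy; infer_instance

-- ===== CLAIM (what is proved, stated in full; the proofs are below) =====
def Claim_equal_dummy : Prop := ∀ (cabinets : List Int), Dom_dummy cabinets → Pre_dummy cabinets → Spec_dummy cabinets (dummy cabinets)

-- ===== LEMMAS AND PROOFS =====

-- cost cs i = Σ_j cs[j] * |j - i|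
def cost : List Int → Int → Int
  | [], _ => 0
  | c :: cs, i => c * |i| + cost cs (i - 1)

-- bestTo cs k = min over 0 ≤ i ≤ k of cost cs i
def bestTo (cs : List Int) : Nat → Int
  | 0 => cost cs 0
  | k + 1 => min (bestTo cs k) (cost cs (k + 1))

-- leftSum cs k = Σ_{j < k} cs[j]
def leftSum : List Int → Nat → Int
  | _, 0 => 0
  | [], _ + 1 => 0
  | c :: cs, k + 1 => c + leftSum cs k

-- cost shifts by the total weight when the target moves left of index 0
lemma cost_shift_neg (cs : List Int) (i : Int) (h : i ≤ 0) :
    cost cs (i - 1) = cost cs i + cs.sum := by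
  induction cs generalizing i with
  | nil => simp [cost]
  | cons c cs ih =>
    simp only [cost, List.sum_cons]
    rw [abs_of_nonpos (by omega : i - 1 ≤ 0), abs_of_nonpos h, ih (i - 1) (by omega)]
    ring

-- A's inner loop (over Nat range) computes cost
lemma inner_fold (cs : List Int) (i acc : Int) :
    (List.range cs.length).foldl (fun cur j => cur + cs.getD j 0 * |(j : Int) - i|) acc
      = acc + cost cs i := by
  induction cs generalizing i acc with
  | nil => simp [cost]
  | cons c cs ih =>
    rw [List.length_cons, List.range_succ_eq_map, List.foldl_cons, List.foldl_map]
    simp only [List.getD_cons_succ, List.getD_cons_zero, Nat.succ_eq_add_one, Nat.cast_add,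
      Nat.cast_zero, Nat.cast_one, cost]
    have hfun : ∀ (j : Nat), ((j : Int) + 1 - i) = (j : Int) - (i - 1) := by intro j; ring
    simp only [hfun]
    rw [ih (i - 1) (acc + c * |(0 : Int) - i|)]
    have : |(0 : Int) - i| = |i| := by rw [zero_sub, abs_neg]
    rw [this]; ring

lemma dummyInner_eq (cs : List Int) (i : Int) : dummyInner cs i = cost cs i := by
  unfold dummyInner
  rw [PySem.List.pyRange_zero_nat, List.foldl_map]
  simp only [PySem.List.pyGetD_natCast]
  rw [inner_fold cs i 0, zero_add]

lemma leftSum_step (cs : List Int) (k : Nat) (h : k < cs.length) :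
    leftSum cs (k + 1) = leftSum cs k + cs.getD k 0 := by
  induction cs generalizing k with
  | nil => simp at h
  | cons c cs ih =>
    cases k with
    | zero => simp [leftSum]
    | succ k' =>
      simp only [leftSum, List.getD_cons_succ]
      rw [ih k' (by simpa using h)]; ring

-- the incremental cost update B performs
lemma cost_step (cs : List Int) (k : Nat) (h : k < cs.length) :
    cost cs ((k : Int) + 1) = cost cs (k : Int) + 2 * leftSum cs (k + 1) - cs.sum := by
  induction cs generalizing k with
  | nil => simp at h
  | cons c cs ih =>
    cases k with
    | zero =>
      simp only [Nat.cast_zero, cost, leftSum, List.sum_cons, zero_add, zero_sub]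
      have h0 := cost_shift_neg cs 0 le_rfl
      rw [show (0 : Int) - 1 = -1 by ring] at h0
      rw [h0]
      simp [abs_of_nonneg]
      ring
    | succ k' =>
      have hk : (((k' + 1 : Nat)) : Int) = (k' : Int) + 1 := by push_cast; ring
      simp only [cost, leftSum, List.sum_cons, hk]
      rw [show (k' : Int) + 1 + 1 - 1 = (k' : Int) + 1 by ring,
          show (k' : Int) + 1 - 1 = (k' : Int) by ring,
          ih k' (by simpa using h)]
      rw [abs_of_nonneg (by positivity : (0:Int) ≤ (k' : Int) + 1 + 1),
          abs_of_nonneg (by positivity : (0:Int) ≤ (k' : Int) + 1)]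
      ring

-- B's cur0 (enumerate sum) computes cost at index 0
lemma enum_fold (cs : List Int) (s acc : Int) (hs : 0 ≤ s) :
    (PySem.List.enumerate cs s).foldl (fun a p => a + p.1 * p.2) acc = acc + cost cs (-s) := by
  induction cs generalizing s acc with
  | nil => simp [PySem.List.enumerate, cost]
  | cons c cs ih =>
    rw [PySem.List.enumerate_cons, List.foldl_cons, ih (s + 1) (acc + s * c) (by omega)]
    simp only [cost]
    rw [show -s - 1 = -(s + 1) by ring, abs_neg, abs_of_nonneg hs]
    ring

-- A's outer loop returns the running minimum
lemma foldA (cs : List Int) (m : Nat) :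
    (PySem.List.pyRange 0 ((m : Int) + 1)).foldl
      (fun (res : Option Int) i =>
        some (match res with
              | none => dummyInner cs i
              | some r => min r (dummyInner cs i))) none = some (bestTo cs m) := by
  induction m with
  | zero =>
    rw [Nat.cast_zero, zero_add, show PySem.List.pyRange 0 1 = [0] by decide]
    simp [bestTo, dummyInner_eq]
  | succ m ih =>
    rw [show ((m + 1 : Nat) : Int) + 1 = ((m : Int) + 1) + 1 by push_cast; ring,
        PySem.List.pyRange_one_succ_right (by positivity), List.foldl_append, ih]
    simp only [List.foldl_cons, List.foldl_nil, bestTo, dummyInner_eq]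

-- B's loop invariant: after m steps the state is (leftSum m, cost m, bestTo m)
lemma foldB (cs : List Int) (m : Nat) (hm : m ≤ cs.length) :
    (PySem.List.pyRange 0 (m : Int)).foldl
      (fun (st : Int × Int × Int) i =>
        let left := st.1 + PySem.List.pyGetD cs i 0
        let cur := st.2.1 + 2 * left - cs.sum
        (left, cur, if cur < st.2.2 then cur else st.2.2))
      (0, cost cs 0, cost cs 0) = (leftSum cs m, cost cs m, bestTo cs m) := by
  induction m with
  | zero =>
    rw [Nat.cast_zero, PySem.List.pyRange_one_eq_nil le_rfl]
    simp [leftSum, bestTo]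
  | succ m ih =>
    have hm' : m < cs.length := by omega
    rw [show ((m + 1 : Nat) : Int) = (m : Int) + 1 by push_cast; ring,
        PySem.List.pyRange_one_succ_right (by positivity), List.foldl_append, ih (by omega)]
    simp only [List.foldl_cons, List.foldl_nil, PySem.List.pyGetD_natCast]
    have hl := leftSum_step cs m hm'
    have hc := cost_step cs m hm'
    refine Prod.ext ?_ (Prod.ext ?_ ?_) <;> simp only
    · omega
    · rw [hc, hl]
    · simp only [bestTo]
      rw [← hl, ← hc]
      rcases lt_or_ge (cost cs ((m : Int) + 1)) (bestTo cs m) with hlt | hge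
      · rw [if_pos (by omega), min_eq_right (le_of_lt hlt)]
      · rw [if_neg (by omega), min_eq_left hge]

theorem dummy_spec : Claim_equal_dummy := by
  intro cs _ hpre
  obtain ⟨m, hm⟩ : ∃ m, cs.length = m + 1 :=
    ⟨cs.length - 1, by (have h0 : cs.length ≠ 0 := by simpa using hpre); omega⟩
  unfold Spec_dummy dummy dummy_alt
  simp only [hm]
  rw [show (((m + 1 : Nat)) : Int) = (m : Int) + 1 by push_cast; ring, foldA cs m,
      Option.getD_some]
  rw [enum_fold cs 0 0 le_rfl, neg_zero, zero_add]
  rw [show (m : Int) + 1 - 1 = (m : Int) by ring, foldB cs m (by omega)]
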